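-- pv_equiv track=rewrite | github.com/zhangningjia0306/cryptography | 2024010021李珊娜/Lab1/caesar.py | score_english
-- ===== SOURCE A (Python) =====
-- def score_english(text):
--     """给文本打分，英文常见片段越多得分越高"""
--     common_parts = {"THE", "AND", "YOU", "ME", "IS", "TALK", "SHOW", "CODE", "CHEAP"}
--     score = 0
--     # 检查所有可能的3-4字母片段
--     for i in range(len(text)-2):
--         triplet = text[i:i+3]
--         if triplet in common_parts:
--             score += 3
--     for i in range(len(text)-3):
--         quad = text[i:i+4]
--         if quad in common_parts:
--             score += 4
--     return score
-- ===== SOURCE B (Python) =====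
-- def score_english(text):
--     """给文本打分，英文常见片段越多得分越高"""
--     common_parts = {"THE", "AND", "YOU", "ME", "IS", "TALK", "SHOW", "CODE", "CHEAP"}
--     return sum(len(w) * text.count(w) for w in common_parts if len(w) in (3, 4))
-- ===== Notes on version B (the rewrite author's own statement) =====
-- stated objective: faster
-- what changed: B iterates over the dictionary words (keeping only the 3/4-letter ones that A's fixed-length slices can ever match) and adds len(w)*text.count(w), instead of A's two position-scanning loops with set lookups; equal because none of these words overlaps itself, so non-overlapping str.count equals the overlapping position count.
import Mathlib
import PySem

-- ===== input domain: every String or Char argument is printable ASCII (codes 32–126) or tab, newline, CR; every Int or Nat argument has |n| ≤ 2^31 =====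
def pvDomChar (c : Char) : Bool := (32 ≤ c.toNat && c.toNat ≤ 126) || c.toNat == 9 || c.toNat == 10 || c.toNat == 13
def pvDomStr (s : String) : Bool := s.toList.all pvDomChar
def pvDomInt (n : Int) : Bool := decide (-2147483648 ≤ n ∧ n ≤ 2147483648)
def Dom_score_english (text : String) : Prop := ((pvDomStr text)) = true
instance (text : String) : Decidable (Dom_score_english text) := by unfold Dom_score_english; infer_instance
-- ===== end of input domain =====

-- B replaces A's two position-scanning loops by one pass over the dictionary's 3/4-letter words,
-- adding len(w)*text.count(w) per word (equal since no word overlaps itself); simpler and faster by a constant factor.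

-- ===== PORT A =====
def score_english (text : String) : Int :=
  let common_parts : PySem.Set String :=
    PySem.Set.ofList ["THE", "AND", "YOU", "ME", "IS", "TALK", "SHOW", "CODE", "CHEAP"]
  let score : Int := 0
  -- for i in range(len(text)-2): triplet = text[i:i+3]; if triplet in common_parts: score += 3
  let score := List.foldl (fun score i =>
      let triplet := PySem.Str.slice text (some i) (some (i + 3))
      if common_parts.contains triplet then score + 3 else score)
    score (PySem.List.pyRange 0 (PySem.Str.len text - 2) 1)
  -- for i in range(len(text)-3): quad = text[i:i+4]; if quad in common_parts: score += 4
  let score := List.foldl (fun score i =>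
      let quad := PySem.Str.slice text (some i) (some (i + 4))
      if common_parts.contains quad then score + 4 else score)
    score (PySem.List.pyRange 0 (PySem.Str.len text - 3) 1)
  score

-- ===== PORT B =====
def score_english_alt (text : String) : Int :=
  let common_parts : PySem.Set String :=
    PySem.Set.ofList ["THE", "AND", "YOU", "ME", "IS", "TALK", "SHOW", "CODE", "CHEAP"]
  -- sum(len(w) * text.count(w) for w in common_parts if len(w) in (3, 4))
  List.foldl (fun acc w =>
      if PySem.Str.len w == 3 || PySem.Str.len w == 4 then
        acc + PySem.Str.len w * (PySem.Str.count text w : Int)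
      else acc)
    0 common_parts

-- ===== PRECONDITION & SPEC =====
def Spec_score_english (text : String) (out : Int) : Prop := out = score_english_alt text
instance (text : String) (out : Int) : Decidable (Spec_score_english text out) := by unfold Spec_score_english; infer_instance

-- ===== CLAIM (what is proved, stated in full; the proofs are below) =====
def Claim_equal_score_english : Prop := ∀ (text : String), Dom_score_english text → Spec_score_english text (score_english text)

-- ===== LEMMAS AND PROOFS =====

-- number of (possibly overlapping) positions at which w starts inside l
def pvOcc (w : List Char) : List Char → ℕ
  | [] => 0
  | c :: t => (if w.isPrefixOf (c :: t) then 1 else 0) + pvOcc w t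

-- w has no nontrivial border (no proper prefix that is also a suffix), so occurrences cannot overlap
def pvBorderless (w : List Char) : Bool :=
  (List.range w.length).all (fun j => decide (j = 0) || decide (w.take (w.length - j) ≠ w.drop j))

theorem pvOcc_eq_countP (w : List Char) (l : List Char) :
    pvOcc w l = (List.range l.length).countP (fun k => w.isPrefixOf (l.drop k)) := by
  induction l with
  | nil => simp [pvOcc]
  | cons c t ih =>
    simp [pvOcc, List.length_cons, List.range_succ_eq_map, List.countP_cons, List.countP_map,
      Function.comp_def, List.drop_succ_cons, ih]
    omega

theorem pv_countP_range_restrict (p : ℕ → Bool) (m n : ℕ) (h : m ≤ n)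
    (h2 : ∀ k, m ≤ k → k < n → p k = false) :
    (List.range n).countP p = (List.range m).countP p := by
  rw [show n = m + (n - m) by omega, List.range_add, List.countP_append]
  have : (List.countP p (List.map (fun x => m + x) (List.range (n - m)))) = 0 := by
    rw [List.countP_eq_zero]
    intro x hx
    simp only [List.mem_map, List.mem_range] at hx
    obtain ⟨k, hk, rfl⟩ := hx
    simp [h2 (m + k) (by omega) (by omega)]
  omega

theorem pv_countP_or_disjoint {α : Type} (l : List α) (p q : α → Bool)
    (h : ∀ x ∈ l, ¬(p x = true ∧ q x = true)) :
    l.countP (fun x => p x || q x) = l.countP p + l.countP q := by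
  induction l with
  | nil => simp
  | cons a t ih =>
    have ht := ih (fun x hx => h x (List.mem_cons_of_mem a hx))
    have ha := h a (List.mem_cons_self)
    cases hp : p a <;> cases hq : q a <;> simp_all [List.countP_cons] <;> omega

theorem pv_foldl_if_addc {α : Type} (p : α → Bool) (c : Int) (l : List α) (a : Int) :
    List.foldl (fun acc x => if p x then acc + c else acc) a l = a + c * (l.countP p : Int) := by
  induction l generalizing a with
  | nil => simp
  | cons x t ih =>
    cases hp : p x <;> simp [List.foldl_cons, hp, ih, List.countP_cons] <;> push_cast <;> ring

theorem pv_no_overlap (w l : List Char) (hb : pvBorderless w = true) (hw : w <+: l)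
    (j : ℕ) (h1 : 0 < j) (h2 : j < w.length) : ¬ w <+: l.drop j := by
  intro hpre
  obtain ⟨r, rfl⟩ := hw
  rw [List.drop_append_of_le_length (by omega)] at hpre
  have hw' : w = (w.drop j ++ r).take w.length := List.prefix_iff_eq_take.mp hpre
  have htk : w.take (w.length - j) = w.drop j := by
    have h3 : ((w.drop j ++ r).take w.length).take (w.length - j) = w.drop j := by
      rw [List.take_take, min_eq_left (by omega), List.take_append_of_le_length (by simp)]
      exact List.take_of_length_le (by simp)
    rw [← hw'] at h3
    exact h3
  have := (List.all_eq_true.mp hb) j (by simp; omega)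
  simp only [Bool.or_eq_true, decide_eq_true_eq] at this
  rcases this with h | h
  · omega
  · exact h htk

theorem pvOcc_tail (w : List Char) (l : List Char) (h : l ≠ []) :
    pvOcc w l = (if w.isPrefixOf l then 1 else 0) + pvOcc w l.tail := by
  cases l with
  | nil => exact absurd rfl h
  | cons c t => rfl

theorem pvOcc_drop_eq (w l : List Char) (hb : pvBorderless w = true) (hw : w <+: l) :
    ∀ d j, 0 < j → j ≤ w.length → w.length - j ≤ d →
      pvOcc w (l.drop j) = pvOcc w (l.drop w.length) := by
  have hlen : w.length ≤ l.length := hw.length_le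
  intro d
  induction d with
  | zero =>
    intro j h1 h2 h3
    have : j = w.length := by omega
    subst this; rfl
  | succ d ih =>
    intro j h1 h2 h3
    by_cases hj : j = w.length
    · subst hj; rfl
    · have hjlt : j < w.length := by omega
      have hne : l.drop j ≠ [] := by
        intro h
        have := congrArg List.length h
        simp at this
        omega
      rw [pvOcc_tail w (l.drop j) hne, List.tail_drop]
      have hnp : w.isPrefixOf (l.drop j) = false := by
        rw [Bool.eq_false_iff]
        intro h
        exact pv_no_overlap w l hb hw j h1 hjlt (List.isPrefixOf_iff_prefix.mp h)
      rw [hnp]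
      simp [ih (j+1) (by omega) (by omega) (by omega)]

theorem pv_count_go_eq (w : List Char) (hw : w ≠ []) (hb : pvBorderless w = true) :
    ∀ fuel l acc, List.length l ≤ fuel →
      PySem.Chars.count.go w fuel l acc = acc + pvOcc w l := by
  intro fuel
  induction fuel with
  | zero =>
    intro l acc hl
    have : l = [] := by cases l <;> simp_all
    subst this
    simp [PySem.Chars.count.go, pvOcc]
  | succ fuel ih =>
    intro l acc hl
    cases l with
    | nil => simp [PySem.Chars.count.go, pvOcc]
    | cons c t =>
      by_cases hp : w.isPrefixOf (c :: t)
      · have hwpre : w <+: (c :: t) := List.isPrefixOf_iff_prefix.mp hp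
        have hwlen : w.length ≤ t.length + 1 := by simpa using hwpre.length_le
        have h0 : 0 < w.length := List.length_pos_iff.mpr hw
        rw [show PySem.Chars.count.go w (fuel+1) (c :: t) acc
              = PySem.Chars.count.go w fuel (List.drop w.length (c :: t)) (acc+1) by
            simp [PySem.Chars.count.go, hp]]
        rw [ih _ _ (by simp at hl ⊢; omega)]
        have hocc : pvOcc w (c :: t) = 1 + pvOcc w (List.drop w.length (c :: t)) := by
          rw [pvOcc_tail w (c :: t) (by simp), hp, if_pos rfl]
          congr 1
          have := pvOcc_drop_eq w (c :: t) hb hwpre w.length 1 (by omega) h0 (by omega)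
          simpa [List.tail_drop] using this
        omega
      · rw [show PySem.Chars.count.go w (fuel+1) (c :: t) acc
              = PySem.Chars.count.go w fuel t acc by
            simp [PySem.Chars.count.go, hp]]
        rw [ih _ _ (by simp at hl; omega)]
        rw [pvOcc_tail w (c :: t) (by simp), Bool.eq_false_iff.mpr hp]
        simp

theorem pv_count_eq_occ (s w : List Char) (hw : w ≠ []) (hb : pvBorderless w = true) :
    PySem.Chars.count s w = pvOcc w s := by
  rw [PySem.Chars.count, if_neg (by simp [hw])]
  simpa using pv_count_go_eq w hw hb s.length s 0 le_rfl

theorem pv_ne_of_len (x w : List Char) (h : x.length ≠ w.length) :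
    decide (x = w) = false := by
  simp only [decide_eq_false_iff_not]
  intro hc
  rw [hc] at h
  exact h rfl

theorem pv_beq_str (s t : String) : (s == t) = decide (s.toList = t.toList) := by
  cases h : decide (s.toList = t.toList) with
  | true => simp at h; simp [String.toList_inj.mp h]
  | false =>
    simp at h
    simp [beq_eq_false_iff_ne]
    intro hc
    exact h (by rw [hc])

theorem pv_loop_count (cs w : List Char) (k : ℕ) (hk : w.length = k) (hk0 : 0 < k) :
    (List.range (cs.length - (k-1))).countP (fun j => decide ((cs.drop j).take k = w))
      = pvOcc w cs := by
  rw [pvOcc_eq_countP,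
    pv_countP_range_restrict (fun j => w.isPrefixOf (cs.drop j)) (cs.length - (k-1)) cs.length
      (by omega)
      (fun j h1 h2 => by
        rw [Bool.eq_false_iff]
        intro hpre
        have := (List.isPrefixOf_iff_prefix.mp hpre).length_le
        simp at this
        omega)]
  apply List.countP_congr
  intro j hj
  simp only [List.mem_range] at hj
  constructor
  · intro h
    simp only [decide_eq_true_eq] at h
    exact List.isPrefixOf_iff_prefix.mpr (List.prefix_iff_eq_take.mpr (by rw [hk, ← h]))
  · intro h
    have := List.prefix_iff_eq_take.mp (List.isPrefixOf_iff_prefix.mp h)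
    simp only [decide_eq_true_eq]
    rw [hk] at this
    exact this.symm

theorem pv_disj {x a b : List Char} (hne : a ≠ b) :
    ¬(decide (x = a) = true ∧ decide (x = b) = true) := by
  rintro ⟨h1, h2⟩
  simp only [decide_eq_true_eq] at h1 h2
  exact hne (h1 ▸ h2)

theorem pv_slice_toList (text : String) (k m : ℕ) :
    (PySem.Str.slice text (some (k : Int)) (some ((k : Int) + (m : Int)))).toList
      = (text.toList.drop k).take m := by
  rw [PySem.Str.toList_slice, PySem.Chars.slice_eq_listSlice]
  exact PySem.List.slice_natCast_add text.toList k m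

theorem pv_loop3 (text : String) :
    (List.range (text.toList.length - 2)).countP
      (fun (k : ℕ) => PySem.Set.contains (["THE", "AND", "YOU", "ME", "IS", "TALK", "SHOW", "CODE", "CHEAP"] : PySem.Set String)
        (PySem.Str.slice text (some (k : Int)) (some ((k : Int) + 3))))
      = pvOcc "THE".toList text.toList + pvOcc "AND".toList text.toList + pvOcc "YOU".toList text.toList := by
  rw [List.countP_congr (q := fun k => decide ((text.toList.drop k).take 3 = "THE".toList)
        || (decide ((text.toList.drop k).take 3 = "AND".toList)
        || decide ((text.toList.drop k).take 3 = "YOU".toList)))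
    (fun k hk => by
      simp only [List.mem_range] at hk
      have hsl : (PySem.Str.slice text (some (k : Int)) (some ((k : Int) + 3))).toList
          = (text.toList.drop k).take 3 := by
        simpa using pv_slice_toList text k 3
      have hlen : ((text.toList.drop k).take 3).length = 3 := by
        simp only [List.length_take, List.length_drop]; omega
      simp only [PySem.Set.contains, List.contains_cons, List.contains_nil, Bool.or_false, pv_beq_str, hsl]
      rw [pv_ne_of_len _ "ME".toList (by rw [hlen]; decide),
        pv_ne_of_len _ "IS".toList (by rw [hlen]; decide),
        pv_ne_of_len _ "TALK".toList (by rw [hlen]; decide),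
        pv_ne_of_len _ "SHOW".toList (by rw [hlen]; decide),
        pv_ne_of_len _ "CODE".toList (by rw [hlen]; decide),
        pv_ne_of_len _ "CHEAP".toList (by rw [hlen]; decide)]
      simp)]
  rw [pv_countP_or_disjoint _ _ _ (fun x hx => by
      rintro ⟨h1, h2⟩
      simp only [Bool.or_eq_true] at h2
      rcases h2 with h2 | h2
      · exact pv_disj (by decide) ⟨h1, h2⟩
      · exact pv_disj (by decide) ⟨h1, h2⟩),
    pv_countP_or_disjoint _ _ _ (fun x hx => pv_disj (by decide)),
    pv_loop_count _ _ 3 (by decide) (by decide),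
    pv_loop_count _ _ 3 (by decide) (by decide),
    pv_loop_count _ _ 3 (by decide) (by decide)]
  omega

theorem pv_loop4 (text : String) :
    (List.range (text.toList.length - 3)).countP
      (fun (k : ℕ) => PySem.Set.contains (["THE", "AND", "YOU", "ME", "IS", "TALK", "SHOW", "CODE", "CHEAP"] : PySem.Set String)
        (PySem.Str.slice text (some (k : Int)) (some ((k : Int) + 4))))
      = pvOcc "TALK".toList text.toList + pvOcc "SHOW".toList text.toList + pvOcc "CODE".toList text.toList := by
  rw [List.countP_congr (q := fun k => decide ((text.toList.drop k).take 4 = "TALK".toList)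
        || (decide ((text.toList.drop k).take 4 = "SHOW".toList)
        || decide ((text.toList.drop k).take 4 = "CODE".toList)))
    (fun k hk => by
      simp only [List.mem_range] at hk
      have hsl : (PySem.Str.slice text (some (k : Int)) (some ((k : Int) + 4))).toList
          = (text.toList.drop k).take 4 := by
        simpa using pv_slice_toList text k 4
      have hlen : ((text.toList.drop k).take 4).length = 4 := by
        simp only [List.length_take, List.length_drop]; omega
      simp only [PySem.Set.contains, List.contains_cons, List.contains_nil, Bool.or_false, pv_beq_str, hsl]
      rw [pv_ne_of_len _ "THE".toList (by rw [hlen]; decide),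
        pv_ne_of_len _ "AND".toList (by rw [hlen]; decide),
        pv_ne_of_len _ "YOU".toList (by rw [hlen]; decide),
        pv_ne_of_len _ "ME".toList (by rw [hlen]; decide),
        pv_ne_of_len _ "IS".toList (by rw [hlen]; decide),
        pv_ne_of_len _ "CHEAP".toList (by rw [hlen]; decide)]
      simp)]
  rw [pv_countP_or_disjoint _ _ _ (fun x hx => by
      rintro ⟨h1, h2⟩
      simp only [Bool.or_eq_true] at h2
      rcases h2 with h2 | h2
      · exact pv_disj (by decide) ⟨h1, h2⟩
      · exact pv_disj (by decide) ⟨h1, h2⟩),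
    pv_countP_or_disjoint _ _ _ (fun x hx => pv_disj (by decide)),
    pv_loop_count _ _ 4 (by decide) (by decide),
    pv_loop_count _ _ 4 (by decide) (by decide),
    pv_loop_count _ _ 4 (by decide) (by decide)]
  omega

theorem pvB_eq (text : String) : score_english_alt text =
    3 * (pvOcc "THE".toList text.toList : Int) + 3 * (pvOcc "AND".toList text.toList : Int)
      + 3 * (pvOcc "YOU".toList text.toList : Int)
      + 4 * (pvOcc "TALK".toList text.toList : Int) + 4 * (pvOcc "SHOW".toList text.toList : Int)
      + 4 * (pvOcc "CODE".toList text.toList : Int) := by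
  have hset : (PySem.Set.ofList ["THE", "AND", "YOU", "ME", "IS", "TALK", "SHOW", "CODE", "CHEAP"]
      : PySem.Set String) = ["THE", "AND", "YOU", "ME", "IS", "TALK", "SHOW", "CODE", "CHEAP"] := by
    decide
  unfold score_english_alt
  rw [hset]
  rw [List.foldl_cons, if_pos (by decide), List.foldl_cons, if_pos (by decide),
    List.foldl_cons, if_pos (by decide), List.foldl_cons, if_neg (by decide),
    List.foldl_cons, if_neg (by decide), List.foldl_cons, if_pos (by decide),
    List.foldl_cons, if_pos (by decide), List.foldl_cons, if_pos (by decide),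
    List.foldl_cons, if_neg (by decide), List.foldl_nil]
  rw [show PySem.Str.len "THE" = 3 by decide, show PySem.Str.len "AND" = 3 by decide,
    show PySem.Str.len "YOU" = 3 by decide, show PySem.Str.len "TALK" = 4 by decide,
    show PySem.Str.len "SHOW" = 4 by decide, show PySem.Str.len "CODE" = 4 by decide]
  show 0 + 3 * (PySem.Str.count text "THE" : Int) + 3 * (PySem.Str.count text "AND" : Int)
      + 3 * (PySem.Str.count text "YOU" : Int) + 4 * (PySem.Str.count text "TALK" : Int)
      + 4 * (PySem.Str.count text "SHOW" : Int) + 4 * (PySem.Str.count text "CODE" : Int) = _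
  rw [PySem.Str.count, PySem.Str.count, PySem.Str.count, PySem.Str.count, PySem.Str.count,
    PySem.Str.count]
  rw [pv_count_eq_occ _ _ (by decide) (by decide), pv_count_eq_occ _ _ (by decide) (by decide),
    pv_count_eq_occ _ _ (by decide) (by decide), pv_count_eq_occ _ _ (by decide) (by decide),
    pv_count_eq_occ _ _ (by decide) (by decide), pv_count_eq_occ _ _ (by decide) (by decide)]
  ring

theorem pvA_eq (text : String) : score_english text =
    3 * ((pvOcc "THE".toList text.toList + pvOcc "AND".toList text.toList
        + pvOcc "YOU".toList text.toList : ℕ) : Int)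
      + 4 * ((pvOcc "TALK".toList text.toList + pvOcc "SHOW".toList text.toList
        + pvOcc "CODE".toList text.toList : ℕ) : Int) := by
  have hset : (PySem.Set.ofList ["THE", "AND", "YOU", "ME", "IS", "TALK", "SHOW", "CODE", "CHEAP"]
      : PySem.Set String) = ["THE", "AND", "YOU", "ME", "IS", "TALK", "SHOW", "CODE", "CHEAP"] := by
    decide
  unfold score_english
  rw [hset]
  simp only [PySem.Str.len_eq, PySem.List.pyRange_one, List.foldl_map, zero_add, Int.sub_zero]
  rw [show ((text.toList.length : Int) - 2).toNat = text.toList.length - 2 by omega,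
    show ((text.toList.length : Int) - 3).toNat = text.toList.length - 3 by omega]
  rw [pv_foldl_if_addc (fun (y : ℕ) =>
      PySem.Set.contains (["THE", "AND", "YOU", "ME", "IS", "TALK", "SHOW", "CODE", "CHEAP"] : PySem.Set String)
        (PySem.Str.slice text (some (y : Int)) (some ((y : Int) + 3)))) 3]
  rw [pv_foldl_if_addc (fun (y : ℕ) =>
      PySem.Set.contains (["THE", "AND", "YOU", "ME", "IS", "TALK", "SHOW", "CODE", "CHEAP"] : PySem.Set String)
        (PySem.Str.slice text (some (y : Int)) (some ((y : Int) + 4)))) 4]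
  rw [pv_loop3]
  rw [pv_loop4]
  push_cast
  ring

-- ===== VERDICT (by name: the statement is the Claim_ definition above) =====
theorem score_english_spec : Claim_equal_score_english := by
  intro text _
  unfold Spec_score_english
  rw [pvA_eq, pvB_eq]
  push_cast
  ring
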